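-- pv_equiv track=rewrite | github.com/Adarshb2000/coding | CF_731B.py | cf_731B
-- ===== SOURCE A (Python) =====
-- def cf_731B(string: str):
--     from string import ascii_lowercase
--     if 'a' not in string:
--         return False
--
--     end = start = string.index('a')
--
--     for c in ascii_lowercase[1 : len(string)]:
--         if start > 0 and string[start - 1] == c:
--             start -= 1
--         elif end < len(string) - 1 and string[end + 1] == c:
--             end += 1
--         else:
--             return False
--
--     return end - start == len(string) - 1
-- ===== SOURCE B (Python) =====
-- def cf_731B(string: str):
--     # Peel letters from the largest down, shrinking the string from the outside in.
--     n = len(string)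
--     if not 1 <= n <= 26:
--         return False
--     window = string
--     for k in range(n - 1, 0, -1):
--         c = chr(97 + k)
--         if window[0] == c:
--             window = window[1:]
--         elif window[-1] == c:
--             window = window[:-1]
--         else:
--             return False
--     return window == 'a'
-- ===== Notes on version B (the rewrite author's own statement) =====
-- stated objective: alternative
-- what changed: B replaces A's interval that grows outward from the position of the smallest letter (letters taken in ascending order) by the reverse strategy: peel the largest required letter off either end of a shrinking window, from the outside in, until only the smallest letter must remain.
import Mathlib
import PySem

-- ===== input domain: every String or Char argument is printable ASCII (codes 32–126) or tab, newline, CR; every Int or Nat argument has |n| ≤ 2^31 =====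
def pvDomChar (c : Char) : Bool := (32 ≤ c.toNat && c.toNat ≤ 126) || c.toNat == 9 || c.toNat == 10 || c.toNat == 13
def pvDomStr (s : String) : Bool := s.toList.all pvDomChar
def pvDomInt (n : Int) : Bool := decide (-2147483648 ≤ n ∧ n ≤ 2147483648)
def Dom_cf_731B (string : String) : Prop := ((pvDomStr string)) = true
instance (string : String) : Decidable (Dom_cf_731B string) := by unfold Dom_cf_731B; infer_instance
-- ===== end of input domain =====

-- B replaces A's interval grown outward from the index of 'a' (letters ascending) by the reverse
-- strategy: peel the largest required letter off either end of a shrinking window, outside in.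

-- ===== PORT A =====
-- the loop `for c in ascii_lowercase[1:len(string)]` with early `return False`;
-- after the loop: `return end - start == len(string) - 1`
def pvALoop (L : List Char) (n : Int) : List Char → Int → Int → Bool
  | [], s, e => decide (e - s = n - 1)
  | c :: cs, s, e =>
    if s > 0 ∧ PySem.List.pyGet? L (s - 1) = some c then pvALoop L n cs (s - 1) e
    else if e < n - 1 ∧ PySem.List.pyGet? L (e + 1) = some c then pvALoop L n cs s (e + 1)
    else false

def cf_731B (string : String) : Bool :=
  if ¬ (PySem.Str.isIn "a" string) then false
  else
    -- string.index('a'): guarded by the `in` test, so it equals str.find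
    let i := PySem.Str.find string "a"
    let n := PySem.Str.len string
    pvALoop string.toList n
      (PySem.Str.slice "abcdefghijklmnopqrstuvwxyz" (some 1) (some n)).toList i i

-- ===== PORT B =====
-- the loop `for k in range(n-1, 0, -1)` peeling chr(97+k) off either end of `window`;
-- after the loop: `return window == 'a'`
def pvBLoop : List Int → List Char → Bool
  | [], w => decide (w = ['a'])
  | k :: ks, w =>
    let c := Char.ofNat (97 + k).toNat
    if PySem.List.pyGet? w 0 = some c then
      pvBLoop ks (PySem.List.slice w (some 1) none)
    else if PySem.List.pyGet? w (-1) = some c then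
      pvBLoop ks (PySem.List.slice w none (some (-1)))
    else false

def cf_731B_alt (string : String) : Bool :=
  let n := PySem.Str.len string
  if ¬ (1 ≤ n ∧ n ≤ 26) then false
  else pvBLoop (PySem.List.pyRange (n - 1) 0 (-1)) string.toList

-- ===== PRECONDITION & SPEC =====
def Spec_cf_731B (string : String) (out : Bool) : Prop := out = cf_731B_alt string
instance (string : String) (out : Bool) : Decidable (Spec_cf_731B string out) := by unfold Spec_cf_731B; infer_instance

-- ===== CLAIM (what is proved, stated in full; the proofs are below) =====
def Claim_equal_cf_731B : Prop := ∀ (string : String), Dom_cf_731B string → Spec_cf_731B string (cf_731B string)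

-- ===== LEMMAS AND PROOFS =====

-- the words the task accepts: built from "a" by appending letter 'a'+k at either end
inductive PvValid : Nat → List Char → Prop
  | base : PvValid 0 ['a']
  | left {k l} : PvValid k l → PvValid (k + 1) (Char.ofNat (97 + (k + 1)) :: l)
  | right {k l} : PvValid k l → PvValid (k + 1) (l ++ [Char.ofNat (97 + (k + 1))])

def pvLetter (j : Nat) : Char := Char.ofNat (97 + j)

lemma pvLetter_toNat {j : Nat} (h : j ≤ 25) : (pvLetter j).toNat = 97 + j := by
  interval_cases j <;> decide

lemma pvLetter_inj {i j : Nat} (hi : i ≤ 25) (hj : j ≤ 25) (h : pvLetter i = pvLetter j) : i = j := by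
  have := congrArg Char.toNat h
  rw [pvLetter_toNat hi, pvLetter_toNat hj] at this
  omega

lemma pvValid_length {k : Nat} {u : List Char} (h : PvValid k u) : u.length = k + 1 := by
  induction h <;> simp_all

lemma pvValid_mem {k : Nat} {u : List Char} (h : PvValid k u) :
    ∀ x ∈ u, ∃ j ≤ k, x = pvLetter j := by
  induction h with
  | base =>
    intro x hx
    have hx' : x = 'a' := by simpa using hx
    exact ⟨0, by omega, by rw [hx']; rfl⟩
  | left _ ih =>
    intro x hx
    rcases List.mem_cons.mp hx with h | h
    · exact ⟨_, le_refl _, h⟩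
    · obtain ⟨j, hj, hx⟩ := ih x h; exact ⟨j, by omega, hx⟩
  | right _ ih =>
    intro x hx
    rcases List.mem_append.mp hx with h | h
    · obtain ⟨j, hj, hx⟩ := ih x h; exact ⟨j, by omega, hx⟩
    · exact ⟨_, le_refl _, by simpa using h⟩

lemma pvValid_a_mem {k : Nat} {u : List Char} (h : PvValid k u) : 'a' ∈ u := by
  induction h <;> simp_all

lemma pvValid_not_mem {k : Nat} {u : List Char} (h : PvValid k u) (hk : k ≤ 24) :
    pvLetter (k + 1) ∉ u := by
  intro hmem
  obtain ⟨j, hj, hx⟩ := pvValid_mem h _ hmem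
  have := pvLetter_inj (by omega) (by omega) hx
  omega

lemma pvValid_nodup {k : Nat} {u : List Char} (hk : k ≤ 25) (h : PvValid k u) : u.Nodup := by
  induction h with
  | base => decide
  | @left k' l h ih =>
    exact List.nodup_cons.mpr ⟨pvValid_not_mem h (by omega), ih (by omega)⟩
  | @right k' l h ih =>
    exact List.Nodup.append (ih (by omega)) (List.nodup_singleton _)
      (by simpa using pvValid_not_mem h (by omega))

-- ---------- B side ----------

lemma pvValid_zero_iff {w : List Char} : PvValid 0 w ↔ w = ['a'] := by
  constructor
  · intro h; cases h; rfl
  · rintro rfl; exact PvValid.base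

lemma pvBLoop_iff (k : Nat) : ∀ w : List Char, k ≤ 25 → w.length = k + 1 →
    (pvBLoop (PySem.List.pyRange (k : Int) 0 (-1)) w = true ↔ PvValid k w) := by
  induction k with
  | zero =>
    intro w _ _
    rw [PySem.List.pyRange_neg_one_eq_nil (by omega)]
    simp [pvBLoop, pvValid_zero_iff]
  | succ k ih =>
    intro w hk hw
    have hcast : ((k + 1 : Nat) : Int) = (k : Int) + 1 := by push_cast; ring
    rw [hcast, PySem.List.pyRange_neg_one_cons (by omega)]
    have hk1 : ((k : Int) + 1 - 1) = (k : Int) := by ring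
    rw [hk1]
    simp only [pvBLoop]
    have hc : Char.ofNat ((97 : Int) + ((k : Int) + 1)).toNat = pvLetter (k + 1) := by
      unfold pvLetter
      rw [show ((97 : Int) + ((k : Int) + 1)).toNat = 97 + (k + 1) from by omega]
    rw [hc, PySem.List.pyGet?_zero, PySem.List.slice_from_one,
        PySem.List.pyGet?_neg_one, PySem.List.slice_to_neg_one]
    have hw0 : w ≠ [] := by intro h; subst h; simp at hw
    split_ifs with h1 h2
    · -- peel at the front
      have htl : w.tail.length = k + 1 := by
        rw [List.length_tail]; omega
      rw [ih w.tail (by omega) htl]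
      constructor
      · intro hv
        have hw' : pvLetter (k + 1) :: w.tail = w := by
          apply List.cons_head?_tail
          rw [List.head?_eq_getElem?]; exact h1
        rw [← hw']
        exact PvValid.left hv
      · intro hv
        cases hv with
        | left h' => simpa using h'
        | @right k' l h' =>
          exfalso
          have hl0 : l ≠ [] := by
            intro h; subst h
            have := pvValid_length h'; simp at this
          have hlp : 0 < l.length := List.length_pos_iff.mpr hl0
          rw [List.getElem?_append_left hlp] at h1
          exact pvValid_not_mem h' (by omega) (List.mem_of_getElem? h1)
    · -- peel at the back
      have hdl : w.dropLast.length = k + 1 := by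
        rw [List.length_dropLast]; omega
      rw [ih w.dropLast (by omega) hdl]
      constructor
      · intro hv
        obtain ⟨l', rfl⟩ : ∃ l', w = l' ++ [pvLetter (k + 1)] :=
          List.getLast?_eq_some_iff.mp h2
        rw [List.dropLast_concat] at hv
        exact PvValid.right hv
      · intro hv
        cases hv with
        | left h' => exact absurd (by simp [pvLetter]) h1
        | right h' => simpa [List.dropLast_concat] using h'
    · -- neither end carries the top letter: not valid
      simp only [false_iff]
      intro hv
      cases hv with
      | left h' => exact h1 (by simp [pvLetter])
      | right h' => exact h2 (by simp [pvLetter])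

-- B port in terms of PvValid
lemma cf_731B_alt_iff (s : String) :
    cf_731B_alt s = true ↔
      (1 ≤ s.toList.length ∧ s.toList.length ≤ 26 ∧ PvValid (s.toList.length - 1) s.toList) := by
  have hlen : PySem.Str.len s = (s.toList.length : Int) := by simp [pysem]
  unfold cf_731B_alt
  rw [hlen]
  by_cases h : 1 ≤ s.toList.length ∧ s.toList.length ≤ 26
  · rw [if_neg (by omega)]
    have hc : ((s.toList.length : Int) - 1) = ((s.toList.length - 1 : Nat) : Int) := by
      have := h.1; omega
    rw [hc, pvBLoop_iff (s.toList.length - 1) s.toList (by omega) (by omega)]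
    exact ⟨fun hv => ⟨h.1, h.2, hv⟩, fun hv => hv.2.2⟩
  · rw [if_pos (by omega)]
    exact ⟨fun hbt => absurd hbt Bool.false_ne_true, fun hv => absurd ⟨hv.1, hv.2.1⟩ h⟩

-- ---------- A side ----------

-- proof-side state form of pvALoop (none = the loop returned False early)
def pvARun (L : List Char) (n : Int) : List Char → Int → Int → Option (Int × Int)
  | [], s, e => some (s, e)
  | c :: cs, s, e =>
    if s > 0 ∧ PySem.List.pyGet? L (s - 1) = some c then pvARun L n cs (s - 1) e
    else if e < n - 1 ∧ PySem.List.pyGet? L (e + 1) = some c then pvARun L n cs s (e + 1)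
    else none

lemma pvALoop_eq_run (L : List Char) (n : Int) : ∀ ls s e,
    pvALoop L n ls s e =
      match pvARun L n ls s e with
      | some (s', e') => decide (e' - s' = n - 1)
      | none => false := by
  intro ls
  induction ls with
  | nil => intro s e; rfl
  | cons c cs ih =>
    intro s e
    simp only [pvALoop, pvARun]
    split_ifs <;> first | exact ih _ _ | rfl

lemma pvARun_append (L : List Char) (n : Int) : ∀ ls ls' s e,
    pvARun L n (ls ++ ls') s e =
      (pvARun L n ls s e).bind (fun p => pvARun L n ls' p.1 p.2) := by
  intro ls
  induction ls with
  | nil => intro ls' s e; rfl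
  | cons c cs ih =>
    intro ls' s e
    simp only [List.cons_append, pvARun]
    split_ifs <;> simp [ih]

-- letters 'a'+a, ..., 'a'+(a+m-1)
def pvSeg (a m : Nat) : List Char := (List.range' a m).map pvLetter

-- soundness: a successful A-run extends a valid window to a valid window
lemma pvARun_sound (L : List Char) : ∀ (m j sn en : Nat) (s' e' : Int),
    pvARun L (L.length : Int) (pvSeg (j + 1) m) (sn : Int) (en : Int) = some (s', e') →
    sn ≤ en → en < L.length →
    PvValid j ((L.drop sn).take (en + 1 - sn)) → en - sn = j →
    ∃ sn' en' : Nat, s' = (sn' : Int) ∧ e' = (en' : Int) ∧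
      sn' ≤ sn ∧ en ≤ en' ∧ en' < L.length ∧ en' - sn' = j + m ∧
      PvValid (j + m) ((L.drop sn').take (en' + 1 - sn')) := by
  intro m
  induction m with
  | zero =>
    intro j sn en s' e' hrun hse hlen hv hj
    simp only [pvSeg, List.range'_zero, List.map_nil, pvARun, Option.some.injEq,
      Prod.mk.injEq] at hrun
    exact ⟨sn, en, hrun.1.symm, hrun.2.symm, le_refl _, le_refl _, hlen, by omega, by
      simpa [Nat.add_zero] using hv⟩
  | succ m ih =>
    intro j sn en s' e' hrun hse hlen hv hj
    rw [show pvSeg (j + 1) (m + 1) = pvLetter (j + 1) :: pvSeg (j + 1 + 1) m from by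
      simp [pvSeg, List.range'_succ]] at hrun
    simp only [pvARun] at hrun
    split_ifs at hrun with h1 h2
    · -- the letter was added on the left
      have hsn : 0 < sn := by exact_mod_cast h1.1
      have hc1 : ((sn : Int) - 1) = ((sn - 1 : Nat) : Int) := by omega
      have hidx : L[sn - 1]? = some (pvLetter (j + 1)) := by
        have := h1.2
        rw [hc1] at this
        simpa using this
      have hlt : sn - 1 < L.length := by omega
      have hget : L[sn - 1] = pvLetter (j + 1) := by
        have := List.getElem?_eq_some_iff.mp hidx
        exact this.choose_spec
      have hwin : (L.drop (sn - 1)).take (en + 1 - (sn - 1))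
          = pvLetter (j + 1) :: (L.drop sn).take (en + 1 - sn) := by
        rw [List.drop_eq_getElem_cons hlt, hget,
          show sn - 1 + 1 = sn from by omega,
          show en + 1 - (sn - 1) = (en + 1 - sn) + 1 from by omega,
          List.take_succ_cons]
      have hv' : PvValid (j + 1) ((L.drop (sn - 1)).take (en + 1 - (sn - 1))) := by
        rw [hwin]; exact PvValid.left hv
      rw [hc1] at hrun
      obtain ⟨sn', en', he1, he2, hle1, hle2, hlt', heq, hv''⟩ :=
        ih (j + 1) (sn - 1) en s' e' hrun (by omega) hlen hv' (by omega)
      exact ⟨sn', en', he1, he2, by omega, hle2, hlt', by omega, by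
        rw [show j + (m + 1) = j + 1 + m from by omega]; exact hv''⟩
    · -- the letter was added on the right
      have hen : en + 1 < L.length := by
        have := h2.1
        omega
      have hc1 : ((en : Int) + 1) = ((en + 1 : Nat) : Int) := by omega
      have hidx : L[en + 1]? = some (pvLetter (j + 1)) := by
        have := h2.2
        rw [hc1, PySem.List.pyGet?_natCast] at this
        exact this
      have hget : L[en + 1] = pvLetter (j + 1) := by
        have := List.getElem?_eq_some_iff.mp hidx
        exact this.choose_spec
      have hwin : (L.drop sn).take (en + 1 + 1 - sn)
          = (L.drop sn).take (en + 1 - sn) ++ [pvLetter (j + 1)] := by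
        rw [show en + 1 + 1 - sn = (en + 1 - sn) + 1 from by omega, List.take_add_one]
        rw [List.getElem?_drop, show sn + (en + 1 - sn) = en + 1 from by omega, hidx]
        rfl
      have hv' : PvValid (j + 1) ((L.drop sn).take (en + 1 + 1 - sn)) := by
        rw [hwin]; exact PvValid.right hv
      rw [hc1] at hrun
      obtain ⟨sn', en', he1, he2, hle1, hle2, hlt', heq, hv''⟩ :=
        ih (j + 1) sn (en + 1) s' e' hrun (by omega) hen hv' (by omega)
      exact ⟨sn', en', he1, he2, hle1, by omega, hlt', by omega, by
        rw [show j + (m + 1) = j + 1 + m from by omega]; exact hv''⟩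

lemma pvTailTake {α : Type} (l : List α) (n : Nat) : (l.take (n + 1)).tail = l.tail.take n := by
  cases l <;> simp

-- completeness: a valid sub-window inside a duplicate-free L is rebuilt by the A-run
lemma pvARun_complete (L : List Char) (hnd : L.Nodup) :
    ∀ (N off : Nat) (u : List Char) (s : Nat),
    PvValid N u → N ≤ 25 → off + N < L.length →
    u = (L.drop off).take (N + 1) →
    off ≤ s → s ≤ off + N → L[s]? = some 'a' →
    pvARun L (L.length : Int) (pvSeg 1 N) (s : Int) (s : Int) = some ((off : Int), ((off + N : Nat) : Int)) := by
  intro N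
  induction N with
  | zero =>
    intro off u s hv _ hofflen hu hos hso ha
    have hs : s = off := by omega
    subst hs
    simp [pvSeg, pvARun]
  | succ N ih =>
    intro off u s hv hN hofflen hu hos hso ha
    have hseg : pvSeg 1 (N + 1) = pvSeg 1 N ++ [pvLetter (N + 1)] := by
      simp only [pvSeg, List.range'_1_concat, List.map_append, List.map_cons, List.map_nil]
      rw [Nat.add_comm 1 N]
    rw [hseg, pvARun_append]
    cases hv with
    | @left N' l hv' =>
      have hlenl : l.length = N + 1 := pvValid_length hv'
      have hL_off : L[off]? = some (pvLetter (N + 1)) := by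
        have h0 : ((L.drop off).take (N + 2))[0]? = some (pvLetter (N + 1)) := by
          rw [← hu]; simp [pvLetter]
        rw [List.getElem?_take_of_lt (by omega), List.getElem?_drop] at h0
        simpa using h0
      have hl : l = (L.drop (off + 1)).take (N + 1) := by
        have ht := congrArg List.tail hu
        simp only [List.tail_cons] at ht
        rw [ht, pvTailTake, List.tail_drop]
      have hsne : s ≠ off := by
        intro h; subst h
        rw [ha] at hL_off
        have h2 := congrArg Char.toNat (Option.some.inj hL_off)
        rw [pvLetter_toNat (by omega), show ('a').toNat = 97 from rfl] at h2
        omega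
      rw [ih (off + 1) l s hv' (by omega) (by omega) hl (by omega) (by omega) ha]
      simp only [Option.bind_some]
      simp only [pvARun]
      rw [if_pos ⟨by exact_mod_cast Nat.succ_pos off, by
        rw [show ((off + 1 : Nat) : Int) - 1 = ((off : Nat) : Int) from by omega,
          PySem.List.pyGet?_natCast]; exact hL_off⟩]
      rw [show off + 1 + N = off + (N + 1) from by omega]
      norm_num
    | @right N' l hv' =>
      have hlenl : l.length = N + 1 := pvValid_length hv'
      have hLr : L[off + N + 1]? = some (pvLetter (N + 1)) := by
        have h0 : (l ++ [Char.ofNat (97 + (N + 1))])[l.length]? = some (Char.ofNat (97 + (N + 1))) :=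
          List.getElem?_concat_length
        rw [hlenl, hu] at h0
        rw [List.getElem?_take_of_lt (by omega), List.getElem?_drop] at h0
        rw [show off + N + 1 = off + (N + 1) from by omega]
        exact h0
      have hl : l = (L.drop off).take (N + 1) := by
        have := congrArg (List.take (N + 1)) hu
        rw [List.take_left' hlenl, List.take_take, Nat.min_eq_left (by omega)] at this
        exact this
      have hsne : s ≠ off + N + 1 := by
        intro h; subst h
        rw [ha] at hLr
        have h2 := congrArg Char.toNat (Option.some.inj hLr)
        rw [pvLetter_toNat (by omega), show ('a').toNat = 97 from rfl] at h2
        omega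
      rw [ih off l s hv' (by omega) (by omega) hl hos (by omega) ha]
      simp only [Option.bind_some]
      simp only [pvARun]
      rw [if_neg ?hno, if_pos ?hyes]
      · rw [show ((off + N : Nat) : Int) + 1 = ((off + N + 1 : Nat) : Int) from by omega]
        rw [show off + (N + 1) = off + N + 1 from by omega]
      case hno =>
        rintro ⟨hpos, hget⟩
        have hoff : 0 < off := by exact_mod_cast hpos
        rw [show ((off : Nat) : Int) - 1 = ((off - 1 : Nat) : Int) from by omega,
          PySem.List.pyGet?_natCast] at hget
        have := List.getElem?_inj (by
          have := List.getElem?_eq_some_iff.mp hget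
          exact this.choose) hnd (hget.trans hLr.symm)
        omega
      case hyes =>
        constructor
        · have : off + N + 1 < L.length := by omega
          omega
        · rw [show ((off + N : Nat) : Int) + 1 = ((off + N + 1 : Nat) : Int) from by omega,
            PySem.List.pyGet?_natCast]
          exact hLr

lemma pvAscii_take (m : Nat) :
    (("abcdefghijklmnopqrstuvwxyz".toList).drop 1).take m = pvSeg 1 (min m 25) := by
  by_cases hm : m ≤ 25
  · rw [Nat.min_eq_left hm]
    exact (show ∀ m' < 26, ((("abcdefghijklmnopqrstuvwxyz".toList).drop 1).take m' = pvSeg 1 m')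
      from by decide) m (by omega)
  · rw [Nat.min_eq_right (by omega),
      List.take_of_length_le (by
        rw [show (("abcdefghijklmnopqrstuvwxyz".toList).drop 1).length = 25 from by decide]
        omega)]
    decide

-- ascii_lowercase[1:n] as a pvSeg
lemma pvAscii_slice (n : Nat) :
    (PySem.Str.slice "abcdefghijklmnopqrstuvwxyz" (some 1) (some (n : Int))).toList
      = pvSeg 1 (min (n - 1) 25) := by
  have h : (PySem.Str.slice "abcdefghijklmnopqrstuvwxyz" (some 1) (some (n : Int))).toList
      = PySem.List.slice ("abcdefghijklmnopqrstuvwxyz".toList) (some 1) (some (n : Int)) := by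
    simp [pysem]
  rw [h, PySem.List.slice_toNat _ (by omega) (by omega)]
  simp only [Int.toNat_one, Int.toNat_natCast]
  exact pvAscii_take (n - 1)

-- A port in terms of PvValid
lemma cf_731B_iff (s : String) :
    cf_731B s = true ↔
      (1 ≤ s.toList.length ∧ s.toList.length ≤ 26 ∧ PvValid (s.toList.length - 1) s.toList) := by
  unfold cf_731B
  by_cases hin : PySem.Str.isIn "a" s = true
  · rw [if_neg (not_not_intro hin)]
    have hinf : ['a'] <:+: s.toList := by
      have := (PySem.Str.isIn_iff_infix _ _).mp hin
      simpa using this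
    have hlen : PySem.Str.len s = (s.toList.length : Int) := by simp [pysem]
    have hfind : PySem.Str.find s "a" = PySem.Chars.find s.toList ['a'] := by simp
    have h0le : 0 ≤ PySem.Chars.find s.toList ['a'] := (PySem.Chars.find_nonneg_iff _ _).mpr hinf
    have hicast : PySem.Chars.find s.toList ['a']
        = (((PySem.Chars.find s.toList ['a']).toNat : Nat) : Int) := by omega
    set iN := (PySem.Chars.find s.toList ['a']).toNat with hiN
    have hpre : ['a'] <+: s.toList.drop iN := (PySem.Chars.find_spec h0le).1
    obtain ⟨t, ht⟩ := hpre
    have hdropiN : s.toList.drop iN = 'a' :: t := by simpa using ht.symm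
    have hgetiN : s.toList[iN]? = some 'a' := by
      have : (s.toList.drop iN)[0]? = some 'a' := by rw [hdropiN]; rfl
      rw [List.getElem?_drop] at this
      simpa using this
    have hiNlt : iN < s.toList.length := (List.getElem?_eq_some_iff.mp hgetiN).choose
    have hwin0 : (s.toList.drop iN).take (iN + 1 - iN) = ['a'] := by
      rw [hdropiN, show iN + 1 - iN = 1 from by omega]
      rfl
    show pvALoop s.toList (PySem.Str.len s)
        ((PySem.Str.slice "abcdefghijklmnopqrstuvwxyz" (some 1) (some (PySem.Str.len s))).toList)
        (PySem.Str.find s "a") (PySem.Str.find s "a") = true ↔ _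
    rw [hlen, hfind, hicast, pvAscii_slice s.toList.length, pvALoop_eq_run]
    constructor
    · intro h
      cases hres : pvARun s.toList (s.toList.length : Int)
          (pvSeg 1 (min (s.toList.length - 1) 25)) (iN : Int) (iN : Int) with
      | none => rw [hres] at h; simp at h
      | some p =>
        obtain ⟨s', e'⟩ := p
        rw [hres] at h
        have heq : e' - s' = (s.toList.length : Int) - 1 := by simpa using h
        obtain ⟨sn', en', rfl, rfl, hle1, hle2, hlt', hdiff, hv⟩ :=
          pvARun_sound s.toList (min (s.toList.length - 1) 25) 0 iN iN s' e'
            (by simpa using hres) (le_refl _) hiNlt (by rw [hwin0]; exact PvValid.base)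
            (by omega)
        have hd : en' - sn' = s.toList.length - 1 := by omega
        have hmin : min (s.toList.length - 1) 25 = s.toList.length - 1 := by omega
        have hsn0 : sn' = 0 := by omega
        have hen' : en' = s.toList.length - 1 := by omega
        refine ⟨by omega, by omega, ?_⟩
        rw [hmin, hsn0, hen'] at hv
        rw [List.drop_zero, show s.toList.length - 1 + 1 - 0 = s.toList.length from by omega,
          List.take_of_length_le (le_refl _), Nat.zero_add] at hv
        exact hv
    · rintro ⟨h1, h2, hv⟩
      have hnd := pvValid_nodup (by omega) hv
      have hrun := pvARun_complete s.toList hnd (s.toList.length - 1) 0 s.toList iN hv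
        (by omega) (by omega)
        (by rw [List.drop_zero, List.take_of_length_le (by omega)])
        (by omega) (by omega) hgetiN
      rw [Nat.min_eq_left (by omega), hrun]
      simp only [decide_eq_true_eq]
      push_cast
      omega
  · rw [if_pos hin]
    constructor
    · intro h; exact absurd h Bool.false_ne_true
    · rintro ⟨h1, h2, hv⟩
      exfalso
      apply hin
      rw [PySem.Str.isIn_iff_infix]
      obtain ⟨u, v, hsplit⟩ := List.append_of_mem (pvValid_a_mem hv)
      exact ⟨u, v, by rw [hsplit]; simp⟩

-- ===== VERDICT (by name: the statement is the Claim_ definition above) =====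
theorem cf_731B_spec : Claim_equal_cf_731B := by
  intro s _
  unfold Spec_cf_731B
  have hA := cf_731B_iff s
  have hB := cf_731B_alt_iff s
  by_cases h : (1 ≤ s.toList.length ∧ s.toList.length ≤ 26 ∧ PvValid (s.toList.length - 1) s.toList)
  · rw [hA.mpr h, (hB.mpr h)]
  · cases hA' : cf_731B s with
    | false =>
      cases hB' : cf_731B_alt s with
      | false => rfl
      | true => exact absurd (hB.mp hB') h
    | true => exact absurd (hA.mp hA') h
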